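-- pv_equiv track=rewrite | github.com/Xpra-org/xpra | xpra/gtk/graph.py | round_up_unit
-- ===== SOURCE A (Python) =====
-- def round_up_unit(i: int, rounding=10) -> int:
--     v = 1
--     while v * rounding < i:
--         v = v * rounding
--     for x in range(10):
--         if v * x > i:
--             return v * x
--     return v * rounding
-- ===== SOURCE B (Python) =====
-- def round_up_unit(i: int, rounding=10) -> int:
--     v = 1
--     while v * rounding < i:
--         v = v * rounding
--     x = max(0, i // v + 1)
--     return v * x if x <= 9 else v * rounding
-- ===== Notes on version B (the rewrite author's own statement) =====
-- stated objective: simpler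
-- what changed: The range(10) first-hit scan is replaced by closed-form floor-division arithmetic (x = max(0, i//v + 1)); Pre_ restricts to the natural domain rounding >= 2, since a rounding base of 0, 1 or a negative number is meaningless for rounding up to a unit multiple (A hangs on some of them and returns accidental values on the rest).
-- outside the precondition, e.g. on round_up_unit(5, -10): A returns 100, B returns 0; on round_up_unit(0, 0): A returns 1, B returns 1; on round_up_unit(-3, 1): A returns 0, B returns 0
import Mathlib
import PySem

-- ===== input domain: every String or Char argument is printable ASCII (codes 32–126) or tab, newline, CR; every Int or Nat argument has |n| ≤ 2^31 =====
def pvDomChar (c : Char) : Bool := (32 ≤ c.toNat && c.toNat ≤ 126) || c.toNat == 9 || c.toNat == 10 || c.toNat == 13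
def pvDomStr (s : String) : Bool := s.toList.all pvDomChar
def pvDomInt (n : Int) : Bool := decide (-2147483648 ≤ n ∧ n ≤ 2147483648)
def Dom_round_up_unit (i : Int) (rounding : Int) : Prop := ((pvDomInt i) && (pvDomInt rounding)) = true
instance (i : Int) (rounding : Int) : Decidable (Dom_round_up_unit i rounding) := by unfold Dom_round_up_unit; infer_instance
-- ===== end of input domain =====

-- B replaces the range(10) first-hit scan with closed-form floor-division arithmetic (simpler; the while-loop for the unit stays).

-- ===== PORT A =====
-- A's while-loop; the fuel is only a totality guard: on Dom ∩ Pre_ the loop runs at most ~33 iterations (v is multiplied by rounding ≥ 2 each step, |i| ≤ 2^31)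
def pvLoopA (i rounding : Int) (v : Int) : Nat → Int
  | 0 => v
  | fuel + 1 => if v * rounding < i then pvLoopA i rounding (v * rounding) fuel else v

-- A's `for x in range(10)` loop with early return
def pvScanA (i rounding v : Int) : List Int → Int
  | [] => v * rounding
  | x :: rest => if v * x > i then v * x else pvScanA i rounding v rest

def round_up_unit (i : Int) (rounding : Int) : Int :=
  pvScanA i rounding (pvLoopA i rounding 1 40) (PySem.List.pyRange 0 10 1)

-- ===== PORT B =====
def pvLoopB (i rounding : Int) (v : Int) : Nat → Int
  | 0 => v
  | fuel + 1 => if v * rounding < i then pvLoopB i rounding (v * rounding) fuel else v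

def round_up_unit_alt (i : Int) (rounding : Int) : Int :=
  let v := pvLoopB i rounding 1 40
  let x := max 0 (PySem.Int.floordiv i v + 1)
  if x ≤ 9 then v * x else v * rounding

-- ===== PRECONDITION & SPEC =====
-- Pre_ restricts to the natural domain of a rounding base, rounding ≥ 2: a base of 0, 1 or a
-- negative number is meaningless for 'round up to a nice unit multiple' (A's loop hangs on part
-- of those inputs and its returned values on the rest are accidents of the scan's sign behaviour).
def Pre_round_up_unit (i : Int) (rounding : Int) : Prop := 2 ≤ rounding
instance (i : Int) (rounding : Int) : Decidable (Pre_round_up_unit i rounding) := by unfold Pre_round_up_unit; infer_instance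
def pvWitness_round_up_unit : Int × Int := (37, 10)

def Spec_round_up_unit (i : Int) (rounding : Int) (out : Int) : Prop := out = round_up_unit_alt i rounding
instance (i : Int) (rounding : Int) (out : Int) : Decidable (Spec_round_up_unit i rounding out) := by unfold Spec_round_up_unit; infer_instance

-- ===== CLAIM (what is proved, stated in full; the proofs are below) =====
def Claim_equal_round_up_unit : Prop := ∀ (i : Int) (rounding : Int), Dom_round_up_unit i rounding → Pre_round_up_unit i rounding → Spec_round_up_unit i rounding (round_up_unit i rounding)

-- ===== LEMMAS AND PROOFS =====

theorem pvLoopA_eq_pvLoopB (i rounding : Int) : ∀ (fuel : Nat) (v : Int), pvLoopA i rounding v fuel = pvLoopB i rounding v fuel := by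
  intro fuel
  induction fuel with
  | zero => intro v; rfl
  | succ n ih => intro v; simp only [pvLoopA, pvLoopB]; split <;> [exact ih _; rfl]

theorem pvLoopA_pos (i rounding : Int) (hr : 2 ≤ rounding) :
    ∀ (fuel : Nat) (v : Int), 0 < v → 0 < pvLoopA i rounding v fuel := by
  intro fuel
  induction fuel with
  | zero => intro v hv; exact hv
  | succ n ih =>
    intro v hv
    simp only [pvLoopA]
    split
    · exact ih _ (mul_pos hv (by omega))
    · exact hv

theorem pvRange10 : PySem.List.pyRange 0 10 1 = [0,1,2,3,4,5,6,7,8,9] := by decide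

-- positive unit: the first x in [0..9] with v*x > i is max 0 (i//v + 1) (when that is ≤ 9)
theorem pvScanA_pos (i rounding v : Int) (hv : 0 < v) :
    pvScanA i rounding v (PySem.List.pyRange 0 10 1) =
      (if max 0 (PySem.Int.floordiv i v + 1) ≤ 9
       then v * max 0 (PySem.Int.floordiv i v + 1) else v * rounding) := by
  rw [pvRange10]
  have hfd : PySem.Int.floordiv i v = i / v := PySem.Int.floordiv_eq_ediv_of_pos hv
  have key : ∀ x : Int, (i < v * x) = (i / v < x) := fun x =>
    propext (by rw [mul_comm]; exact (Int.ediv_lt_iff_lt_mul hv).symm)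
  simp only [pvScanA, gt_iff_lt, hfd, key]
  set q := i / v with hq
  split_ifs <;> first | rfl | omega | (congr 1; omega)

-- ===== VERDICT (by name: the statement is the Claim_ definition above) =====
theorem round_up_unit_spec : Claim_equal_round_up_unit := by
  intro i rounding _ hpre
  have hL : pvLoopA i rounding 1 40 = pvLoopB i rounding 1 40 := pvLoopA_eq_pvLoopB i rounding 40 1
  have hv : 0 < pvLoopA i rounding 1 40 := pvLoopA_pos i rounding hpre 40 1 one_pos
  show round_up_unit i rounding = round_up_unit_alt i rounding
  unfold round_up_unit round_up_unit_alt
  rw [← hL, pvScanA_pos i rounding _ hv]
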